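-- pv_equiv track=rewrite | github.com/pypi-data/pypi-mirror-305 | packages/ipor-fusion/ipor_fusion-0.2.0-py3-none-any.whl/ipor_fusion/UniswapV3UniversalRouter.py | generate_types_by_length
-- ===== SOURCE A (Python) =====
-- def generate_types_by_length(length):
--     types = []
--     for i in range(length):
--         if i % 2 == 0:
--             types.append("address")
--         else:
--             types.append("uint24")
--     return types
-- ===== SOURCE B (Python) =====
-- def generate_types_by_length(length):
--     n = (length + 1) // 2
--     return (["address", "uint24"] * n)[:length]
-- ===== Notes on version B (the rewrite author's own statement) =====
-- stated objective: idiomatic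
-- what changed: Replaces the per-index loop with its parity branch by repeating the two-element unit the needed number of times and truncating with a slice.
import Mathlib
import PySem

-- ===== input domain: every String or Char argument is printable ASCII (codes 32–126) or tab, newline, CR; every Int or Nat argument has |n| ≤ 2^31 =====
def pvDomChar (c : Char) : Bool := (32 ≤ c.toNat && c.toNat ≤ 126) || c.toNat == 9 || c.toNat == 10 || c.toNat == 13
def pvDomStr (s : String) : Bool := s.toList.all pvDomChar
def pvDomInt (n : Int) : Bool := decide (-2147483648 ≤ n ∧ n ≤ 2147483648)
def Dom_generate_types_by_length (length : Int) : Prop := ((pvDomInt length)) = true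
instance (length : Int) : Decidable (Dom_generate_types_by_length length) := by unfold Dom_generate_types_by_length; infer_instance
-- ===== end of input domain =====

-- B builds the list by repeating the unit ["address","uint24"] and slicing to length, instead of A's per-index loop with parity branch (idiomatic).


-- ===== PORT A =====
def generate_types_by_length (length : Int) : List String :=
  (PySem.List.pyRange 0 length 1).foldl
    (fun types i => if PySem.Int.mod i 2 = 0 then types ++ ["address"] else types ++ ["uint24"])
    []

-- ===== PORT B =====
def generate_types_by_length_alt (length : Int) : List String :=
  let n : Int := PySem.Int.floordiv (length + 1) 2
  PySem.List.slice ((List.replicate n.toNat ["address", "uint24"]).flatten) none (some length)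

-- ===== PRECONDITION & SPEC =====
def Spec_generate_types_by_length (length : Int) (out : List String) : Prop := out = generate_types_by_length_alt length
instance (length : Int) (out : List String) : Decidable (Spec_generate_types_by_length length out) := by unfold Spec_generate_types_by_length; infer_instance

-- ===== CLAIM (what is proved, stated in full; the proofs are below) =====
def Claim_equal_generate_types_by_length : Prop := ∀ (length : Int), Dom_generate_types_by_length length → Spec_generate_types_by_length length (generate_types_by_length length)

-- ===== LEMMAS AND PROOFS =====

-- the unit repeated k times is the first 2*k parity values
theorem pv_flatten_replicate (k : Nat) :
    (List.replicate k (["address", "uint24"] : List String)).flatten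
      = (List.range (2 * k)).map (fun j => if j % 2 = 0 then "address" else "uint24") := by
  induction k with
  | zero => simp
  | succ k ih =>
      rw [List.replicate_succ', List.flatten_append, ih,
        show 2 * (k + 1) = (2 * k + 1) + 1 by ring, List.range_succ, List.range_succ]
      simp [Nat.add_mod, Nat.mul_mod_right]

-- A's loop result for a nonnegative length n
theorem pv_A_eq (n : Nat) :
    generate_types_by_length (n : Int)
      = (List.range n).map (fun j => if j % 2 = 0 then "address" else "uint24") := by
  unfold generate_types_by_length
  have hfun : (fun (types : List String) (i : Int) =>
      if PySem.Int.mod i 2 = 0 then types ++ ["address"] else types ++ ["uint24"])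
      = fun types i => types ++ [if PySem.Int.mod i 2 = 0 then "address" else "uint24"] := by
    funext types i; split <;> simp_all
  rw [hfun, PySem.List.foldl_append_singleton_eq_map, PySem.List.pyRange_one]
  simp only [sub_zero, Int.toNat_natCast, zero_add, List.map_map, List.nil_append]
  refine List.map_congr_left ?_
  intro j _
  have : PySem.Int.mod (j : Int) 2 = ((j % 2 : Nat) : Int) := by
    exact_mod_cast PySem.Int.mod_natCast j 2
  simp only [Function.comp, this]
  by_cases h : j % 2 = 0 <;> simp [h]
  omega

theorem generate_types_by_length_agree (length : Int) :
    generate_types_by_length length = generate_types_by_length_alt length := by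
  have halt : generate_types_by_length_alt length
      = PySem.List.slice
          ((List.replicate (PySem.Int.floordiv (length + 1) 2).toNat
            ["address", "uint24"]).flatten) none (some length) := rfl
  rw [halt]
  by_cases h : length ≤ 0
  · have hA : generate_types_by_length length = [] := by
      unfold generate_types_by_length
      rw [PySem.List.pyRange_one_eq_nil h]; rfl
    have hn : (PySem.Int.floordiv (length + 1) 2).toNat = 0 := by
      rw [PySem.Int.floordiv_eq_ediv_of_pos (by omega)]; omega
    rw [hA, hn]
    simp [PySem.List.slice]
  · obtain ⟨n, rfl⟩ : ∃ n : Nat, length = (n : Int) :=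
      ⟨length.toNat, by omega⟩
    have hk : (PySem.Int.floordiv ((n : Int) + 1) 2).toNat = (n + 1) / 2 := by
      rw [PySem.Int.floordiv_eq_ediv_of_pos (by omega)]
      omega
    rw [pv_A_eq, hk, pv_flatten_replicate, PySem.List.slice_to_natCast,
      ← List.map_take, List.take_range]
    rw [Nat.min_eq_left (by omega)]


-- ===== VERDICT (by name: the statement is the Claim_ definition above) =====
theorem generate_types_by_length_spec : Claim_equal_generate_types_by_length := by
  intro length _
  exact generate_types_by_length_agree length
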